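-- pv_equiv track=rewrite | github.com/daniel-reich/ubiquitous-fiesta | HBuWYyh5YCmDKF4uH_16.py | almost_sorted
-- ===== SOURCE A (Python) =====
-- def almost_sorted(lst):
--   if lst == sorted(lst) or lst == sorted(lst, reverse = True):
--     return False
--   for i in range(len(lst)):
--     temp = lst.copy()
--     temp.pop(i)
--     if temp == sorted(temp) or temp == sorted(temp, reverse = True):
--       return True
--   return False
-- ===== SOURCE B (Python) =====
-- def _nondec(a):
--     return all(a[k] <= a[k + 1] for k in range(len(a) - 1))
--
--
-- def _fix(a):
--     # a is known not to be non-decreasing: locate the first violation and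
--     # test the only two removals that can repair it.
--     i = next(k for k in range(len(a) - 1) if a[k] > a[k + 1])
--     return _nondec(a[:i] + a[i + 1:]) or _nondec(a[:i + 1] + a[i + 2:])
--
--
-- def almost_sorted(lst):
--     if _nondec(lst) or _nondec(lst[::-1]):
--         return False
--     return _fix(lst) or _fix(lst[::-1])
-- ===== Notes on version B (the rewrite author's own statement) =====
-- stated objective: faster
-- what changed: Replaces the try-every-removal loop (each trial comparing against two sorts) with a linear scan that finds the first monotonicity break and tests only the two removals that can repair it, once per direction.
import Mathlib
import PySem

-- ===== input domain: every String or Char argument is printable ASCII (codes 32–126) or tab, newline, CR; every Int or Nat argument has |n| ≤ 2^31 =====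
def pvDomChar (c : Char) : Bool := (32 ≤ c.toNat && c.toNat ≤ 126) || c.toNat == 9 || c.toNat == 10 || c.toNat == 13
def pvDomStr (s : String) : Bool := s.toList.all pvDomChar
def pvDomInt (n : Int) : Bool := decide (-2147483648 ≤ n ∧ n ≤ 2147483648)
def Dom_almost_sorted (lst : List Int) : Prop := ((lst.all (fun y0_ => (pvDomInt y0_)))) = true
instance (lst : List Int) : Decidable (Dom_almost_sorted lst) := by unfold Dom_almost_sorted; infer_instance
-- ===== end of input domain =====

-- B replaces A's try-every-removal-and-sort loop with a linear scan that finds the first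
-- monotonicity break and tests only the two removals that can repair it, per direction.

-- ===== PORT A =====
-- 'temp = lst.copy(); temp.pop(i)' for i in range(len(lst)) is exactly lst.eraseIdx i
-- (PySem.List.pop?_natCast); the early-return-True for-loop over range(len(lst)) is List.any.
def almost_sorted (lst : List Int) : Bool :=
  if lst = PySem.List.sorted lst (fun x => x) false ∨
     lst = PySem.List.sorted lst (fun x => x) true then false
  else
    (List.range lst.length).any (fun i =>
      let temp := lst.eraseIdx i
      decide (temp = PySem.List.sorted temp (fun x => x) false ∨
              temp = PySem.List.sorted temp (fun x => x) true))

-- ===== PORT B =====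
-- _nondec: all(a[k] <= a[k+1] for k in range(len(a)-1)); the indices are in range, getD is exact.
def pvNondec (a : List Int) : Bool :=
  (List.range (a.length - 1)).all (fun k => decide (a.getD k 0 ≤ a.getD (k + 1) 0))

-- _fix: i = next(k for k in range(len(a)-1) if a[k] > a[k+1]); a[:i]+a[i+1:] and
-- a[:i+1]+a[i+2:] are take/drop (nonnegative slice bounds, PySem.List.slice_natCast).
-- 'none' is Python's StopIteration: unreachable, since _fix is only called on non-sorted input.
def pvFix (a : List Int) : Bool :=
  match (List.range (a.length - 1)).find? (fun k => decide (a.getD (k + 1) 0 < a.getD k 0)) with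
  | none => false
  | some i =>
      pvNondec (a.take i ++ a.drop (i + 1)) || pvNondec (a.take (i + 1) ++ a.drop (i + 2))

def almost_sorted_alt (lst : List Int) : Bool :=
  if pvNondec lst || pvNondec lst.reverse then false
  else pvFix lst || pvFix lst.reverse

-- ===== PRECONDITION & SPEC =====
def Spec_almost_sorted (lst : List Int) (out : Bool) : Prop := out = almost_sorted_alt lst
instance (lst : List Int) (out : Bool) : Decidable (Spec_almost_sorted lst out) := by unfold Spec_almost_sorted; infer_instance

-- ===== CLAIM (what is proved, stated in full; the proofs are below) =====
def Claim_equal_almost_sorted : Prop := ∀ (lst : List Int), Dom_almost_sorted lst → Spec_almost_sorted lst (almost_sorted lst)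

-- ===== LEMMAS AND PROOFS =====

lemma pv_sortedF_iff (a : List Int) :
    a = PySem.List.sorted a (fun x => x) false ↔ a.IsChain (fun x y : Int => x ≤ y) := by
  rw [List.isChain_iff_pairwise]
  constructor
  · intro h; rw [h]; simpa using PySem.List.sorted_pairwise a (fun x => x)
  · intro h; exact (PySem.List.sorted_eq_self_of_pairwise a (fun x : Int => x) h).symm

lemma pv_sortedT_iff (a : List Int) :
    a = PySem.List.sorted a (fun x => x) true ↔ a.IsChain (fun x y : Int => y ≤ x) := by
  have hpw := @List.isChain_iff_pairwise Int (fun x y => y ≤ x) a ⟨fun h1 h2 => le_trans h2 h1⟩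
  rw [hpw]
  constructor
  · intro h; rw [h]; simpa using PySem.List.sorted_pairwise_rev a (fun x => x)
  · intro h; exact (PySem.List.sorted_rev_eq_self_of_pairwise a (fun x : Int => x) h).symm

lemma pv_nondec_iff (a : List Int) :
    pvNondec a = true ↔ a.IsChain (fun x y : Int => x ≤ y) := by
  rw [pvNondec, List.all_eq_true, List.isChain_iff_getElem]
  constructor
  · intro h k hk
    have := h k (List.mem_range.mpr (by omega))
    rw [List.getD_eq_getElem _ _ (by omega : k < a.length),
        List.getD_eq_getElem _ _ hk] at this
    simpa using this
  · intro h k hk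
    have hk' := List.mem_range.mp hk
    rw [List.getD_eq_getElem _ _ (by omega : k < a.length),
        List.getD_eq_getElem _ _ (by omega : k + 1 < a.length)]
    simpa using h k (by omega)

lemma pv_eraseIdx_reverse (a : List Int) (j : Nat) (hj : j < a.length) :
    (a.reverse).eraseIdx j = (a.eraseIdx (a.length - 1 - j)).reverse := by
  have hl1 : (a.reverse.eraseIdx j).length = a.length - 1 := by
    rw [List.length_eraseIdx_of_lt (by simpa using hj)]; simp
  have hl2 : (a.eraseIdx (a.length - 1 - j)).length = a.length - 1 := by
    rw [List.length_eraseIdx_of_lt (by omega)]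
  apply List.ext_getElem
  · rw [hl1]; rw [List.length_reverse, hl2]
  · intro m hm hm'
    rw [hl1] at hm
    by_cases hmj : m < j
    · rw [List.getElem_eraseIdx_of_lt (by omega) hmj,
          List.getElem_reverse, List.getElem_reverse,
          List.getElem_eraseIdx_of_ge (by omega) (by rw [hl2] at *; omega)]
      congr 1; rw [hl2] at *; omega
    · rw [List.getElem_eraseIdx_of_ge (by omega) (by omega),
          List.getElem_reverse, List.getElem_reverse,
          List.getElem_eraseIdx_of_lt (by omega) (by rw [hl2] at *; omega)]
      congr 1; rw [hl2] at *; omega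

lemma pv_fix_eq (a : List Int) (i : Nat)
    (hfind : (List.range (a.length - 1)).find?
      (fun k => decide (a.getD (k + 1) 0 < a.getD k 0)) = some i) :
    pvFix a = (pvNondec (a.take i ++ a.drop (i + 1)) ||
               pvNondec (a.take (i + 1) ++ a.drop (i + 2))) := by
  unfold pvFix; rw [hfind]

lemma pv_fix_iff (a : List Int) (h : ¬ a.IsChain (fun x y : Int => x ≤ y)) :
    pvFix a = true ↔ ∃ i < a.length, (a.eraseIdx i).IsChain (fun x y : Int => x ≤ y) := by
  rw [List.isChain_iff_getElem] at h
  push Not at h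
  obtain ⟨w, hw, hwv⟩ := h
  have hsome : ((List.range (a.length - 1)).find?
      (fun k => decide (a.getD (k + 1) 0 < a.getD k 0))).isSome := by
    rw [List.find?_isSome]
    refine ⟨w, List.mem_range.mpr (by omega), ?_⟩
    rw [List.getD_eq_getElem _ _ (by omega : w < a.length),
        List.getD_eq_getElem _ _ hw]
    simp; omega
  obtain ⟨v, hfind⟩ := Option.isSome_iff_exists.mp hsome
  obtain ⟨hpv, i, hi, hiv, hfirst⟩ := List.find?_eq_some_iff_getElem.mp hfind
  rw [List.getElem_range] at hiv
  subst hiv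
  rw [List.length_range] at hi
  have hi1 : i + 1 < a.length := by omega
  rw [List.getD_eq_getElem _ _ (by omega : i < a.length),
      List.getD_eq_getElem _ _ hi1] at hpv
  have hvi : a[i + 1] < a[i]'(by omega) := by simpa using hpv
  rw [pv_fix_eq a i hfind, ← List.eraseIdx_eq_take_drop_succ, ← List.eraseIdx_eq_take_drop_succ,
      Bool.or_eq_true, pv_nondec_iff, pv_nondec_iff]
  constructor
  · rintro (h1 | h1)
    · exact ⟨i, by omega, h1⟩
    · exact ⟨i + 1, by omega, h1⟩
  · rintro ⟨k, hkl, hch⟩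
    rcases Nat.lt_trichotomy k i with hlt | rfl | hgt
    · exfalso
      have hlen : (i - 1) + 1 < (a.eraseIdx k).length := by
        rw [List.length_eraseIdx_of_lt (by omega)]; omega
      have hc := List.isChain_iff_getElem.mp hch (i - 1) hlen
      rw [List.getElem_eraseIdx_of_ge (by omega) (by omega),
          List.getElem_eraseIdx_of_ge (by omega) (by omega)] at hc
      have e1 : i - 1 + 1 = i := by omega
      simp only [e1] at hc
      omega
    · exact Or.inl hch
    · rcases Nat.eq_or_lt_of_le hgt with rfl | hgt'
      · exact Or.inr hch
      · exfalso
        have hlen : i + 1 < (a.eraseIdx k).length := by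
          rw [List.length_eraseIdx_of_lt (by omega)]; omega
        have hc := List.isChain_iff_getElem.mp hch i hlen
        rw [List.getElem_eraseIdx_of_lt (by omega) (by omega),
            List.getElem_eraseIdx_of_lt (by omega) (by omega)] at hc
        omega

lemma pv_exists_rev (a : List Int) :
    (∃ j < a.reverse.length, ((a.reverse).eraseIdx j).IsChain (fun x y : Int => x ≤ y)) ↔
    ∃ i < a.length, (a.eraseIdx i).IsChain (fun x y : Int => y ≤ x) := by
  constructor
  · rintro ⟨j, hj, hch⟩
    rw [List.length_reverse] at hj
    refine ⟨a.length - 1 - j, by omega, ?_⟩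
    rw [pv_eraseIdx_reverse a j hj] at hch
    exact (List.isChain_reverse).mp hch
  · rintro ⟨i, hi, hch⟩
    refine ⟨a.length - 1 - i, by simp; omega, ?_⟩
    rw [pv_eraseIdx_reverse a (a.length - 1 - i) (by omega)]
    have : a.length - 1 - (a.length - 1 - i) = i := by omega
    rw [this]
    exact (List.isChain_reverse).mpr hch

-- ===== VERDICT (by name: the statement is the Claim_ definition above) =====
theorem almost_sorted_spec : Claim_equal_almost_sorted := by
  intro lst _
  unfold Spec_almost_sorted
  have hguard : (lst = PySem.List.sorted lst (fun x => x) false ∨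
      lst = PySem.List.sorted lst (fun x => x) true) ↔
      (pvNondec lst || pvNondec lst.reverse) = true := by
    rw [Bool.or_eq_true, pv_nondec_iff, pv_nondec_iff, pv_sortedF_iff, pv_sortedT_iff,
        List.isChain_reverse]
  by_cases hs : lst = PySem.List.sorted lst (fun x => x) false ∨
      lst = PySem.List.sorted lst (fun x => x) true
  · rw [almost_sorted, almost_sorted_alt, if_pos hs, if_pos (hguard.mp hs)]
  · rw [almost_sorted, almost_sorted_alt, if_neg hs,
        if_neg (fun hb => hs (hguard.mpr hb))]
    have hnd : ¬ lst.IsChain (fun x y : Int => x ≤ y) := by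
      rw [← pv_sortedF_iff]; tauto
    have hndr : ¬ (lst.reverse).IsChain (fun x y : Int => x ≤ y) := by
      rw [List.isChain_reverse, ← pv_sortedT_iff]; tauto
    rw [Bool.eq_iff_iff, List.any_eq_true, Bool.or_eq_true,
        pv_fix_iff lst hnd, pv_fix_iff lst.reverse hndr, pv_exists_rev]
    constructor
    · rintro ⟨i, hi, hP⟩
      rw [List.mem_range] at hi
      rcases of_decide_eq_true hP with h1 | h1
      · exact Or.inl ⟨i, hi, (pv_sortedF_iff _).mp h1⟩
      · exact Or.inr ⟨i, hi, (pv_sortedT_iff _).mp h1⟩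
    · rintro (⟨i, hi, h1⟩ | ⟨i, hi, h1⟩)
      · exact ⟨i, List.mem_range.mpr hi, decide_eq_true (Or.inl ((pv_sortedF_iff _).mpr h1))⟩
      · exact ⟨i, List.mem_range.mpr hi, decide_eq_true (Or.inr ((pv_sortedT_iff _).mpr h1))⟩
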